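-- pv_equiv track=rewrite | github.com/mk7sub/test-scenario-agent | source/generate_dataset.py | make_extra_logs
-- ===== SOURCE A (Python) =====
-- from typing import List, Tuple
--
-- def make_extra_logs(target_lines: int, case_prefix: str) -> List[str]:
--     """仕様外のステータスやERRORが混入しているログ。"""
--     lines: List[str] = []
--     order_id = 1
--     ts_base = "2026-02-05 13:00:00"
--
--     while len(lines) < target_lines:
--         # 正常な注文
--         lines.append(f"{ts_base} INFO order={case_prefix}-N{order_id} status=受付済み message=受付完了")
--         if len(lines) >= target_lines:
--             break
--         lines.append(f"{ts_base} INFO order={case_prefix}-N{order_id} status=仕掛中 message=調理開始")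
--         if len(lines) >= target_lines:
--             break
--         lines.append(f"{ts_base} INFO order={case_prefix}-N{order_id} status=完了 message=調理完了・呼び出し")
--         if len(lines) >= target_lines:
--             break
--
--         # 仕様外ステータス
--         order_id += 1
--         lines.append(f"{ts_base} WARN order={case_prefix}-X{order_id} status=キャンセル message=ユーザーキャンセル (仕様外ステータス)")
--         if len(lines) >= target_lines:
--             break
--         # ERROR ログ
--         lines.append(f"{ts_base} ERROR order={case_prefix}-X{order_id} status=仕掛中 message=キッチン端末との通信エラー")
--         if len(lines) >= target_lines:
--             break
--
--         order_id += 1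
--
--     return lines[:target_lines]
-- ===== SOURCE B (Python) =====
-- from typing import List
--
-- _TS = "2026-02-05 13:00:00"
-- # one row per line kind: (level, tag, id offset, status, message)
-- _TEMPLATES = [
--     ("INFO", "N", 1, "受付済み", "受付完了"),
--     ("INFO", "N", 1, "仕掛中", "調理開始"),
--     ("INFO", "N", 1, "完了", "調理完了・呼び出し"),
--     ("WARN", "X", 2, "キャンセル", "ユーザーキャンセル (仕様外ステータス)"),
--     ("ERROR", "X", 2, "仕掛中", "キッチン端末との通信エラー"),
-- ]
--
--
-- def make_extra_logs(target_lines: int, case_prefix: str) -> List[str]: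
--     """仕様外のステータスやERRORが混入しているログ。"""
--
--     def line(i: int) -> str:
--         level, tag, offset, status, message = _TEMPLATES[i % 5]
--         oid = 2 * (i // 5) + offset
--         return (f"{_TS} {level} order={case_prefix}-{tag}{oid} "
--                 f"status={status} message={message}")
--
--     return [line(i) for i in range(max(0, target_lines))]
-- ===== Notes on version B (the rewrite author's own statement) =====
-- stated objective: idiomatic
-- what changed: Replaces A's stateful while-loop (running order_id, a break-check after every append, final slice) by a table-driven pure function: a template table plus line(i) computing level/tag/status and order id 2*(i//5)+offset directly from the line index, with the result a single list comprehension over range(max(0,target_lines)) and no truncation at all.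
import Mathlib
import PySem

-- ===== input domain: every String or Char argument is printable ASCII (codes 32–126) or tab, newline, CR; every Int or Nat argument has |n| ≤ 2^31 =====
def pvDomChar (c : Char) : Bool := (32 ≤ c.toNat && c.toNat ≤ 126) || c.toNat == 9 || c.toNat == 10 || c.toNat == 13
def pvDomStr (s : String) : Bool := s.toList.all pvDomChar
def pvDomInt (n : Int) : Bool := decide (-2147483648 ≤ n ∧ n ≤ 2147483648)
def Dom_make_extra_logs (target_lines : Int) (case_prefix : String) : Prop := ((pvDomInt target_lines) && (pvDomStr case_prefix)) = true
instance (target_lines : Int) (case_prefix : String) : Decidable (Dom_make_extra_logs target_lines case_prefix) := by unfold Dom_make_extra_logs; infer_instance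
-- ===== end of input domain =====

-- B replaces A's stateful while-loop (running order_id, break after every append, final slice)
-- by a template table and a pure per-index line function mapped over range(max(0,n))
-- (objective: idiomatic; same cost).

-- ===== PORT A =====
-- the five f-string templates of A
def tsBase : String := "2026-02-05 13:00:00"
def lineN1 (p : String) (oid : Int) : String :=
  tsBase ++ " INFO order=" ++ p ++ "-N" ++ PySem.Int.toStr oid ++ " status=受付済み message=受付完了"
def lineN2 (p : String) (oid : Int) : String :=
  tsBase ++ " INFO order=" ++ p ++ "-N" ++ PySem.Int.toStr oid ++ " status=仕掛中 message=調理開始"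
def lineN3 (p : String) (oid : Int) : String :=
  tsBase ++ " INFO order=" ++ p ++ "-N" ++ PySem.Int.toStr oid ++ " status=完了 message=調理完了・呼び出し"
def lineX1 (p : String) (oid : Int) : String :=
  tsBase ++ " WARN order=" ++ p ++ "-X" ++ PySem.Int.toStr oid ++ " status=キャンセル message=ユーザーキャンセル (仕様外ステータス)"
def lineX2 (p : String) (oid : Int) : String :=
  tsBase ++ " ERROR order=" ++ p ++ "-X" ++ PySem.Int.toStr oid ++ " status=仕掛中 message=キッチン端末との通信エラー"

-- A's while-loop: append one line at a time, checking `len(lines) >= target_lines` after each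
def loopA (t : Int) (p : String) (lines : List String) (oid : Int) : List String :=
  if (lines.length : Int) < t then
    let l1 := lines ++ [lineN1 p oid]
    if (l1.length : Int) ≥ t then l1 else
    let l2 := l1 ++ [lineN2 p oid]
    if (l2.length : Int) ≥ t then l2 else
    let l3 := l2 ++ [lineN3 p oid]
    if (l3.length : Int) ≥ t then l3 else
    let oid' := oid + 1
    let l4 := l3 ++ [lineX1 p oid']
    if (l4.length : Int) ≥ t then l4 else
    let l5 := l4 ++ [lineX2 p oid']
    if (l5.length : Int) ≥ t then l5 else
    loopA t p l5 (oid' + 1)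
  else lines
termination_by (t - lines.length).toNat
decreasing_by simp [l5, l4, l3, l2, l1] at *; omega

def make_extra_logs (target_lines : Int) (case_prefix : String) : List String :=
  PySem.List.slice (loopA target_lines case_prefix [] 1) none (some target_lines)   -- lines[:target_lines]

-- ===== PORT B =====
-- Source B's _TEMPLATES: one row per line kind, (level, tag, id offset, status, message)
def tmplB : List (String × String × Int × String × String) :=
  [("INFO", "N", 1, "受付済み", "受付完了"),
   ("INFO", "N", 1, "仕掛中", "調理開始"),
   ("INFO", "N", 1, "完了", "調理完了・呼び出し"),
   ("WARN", "X", 2, "キャンセル", "ユーザーキャンセル (仕様外ステータス)"),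
   ("ERROR", "X", 2, "仕掛中", "キッチン端末との通信エラー")]

-- Source B's line(i); _TEMPLATES[i % 5] with i % 5 < 5 = tmplB.length is always in range, so getD is exact
def lineB (p : String) (i : Nat) : String :=
  let t := tmplB.getD (i % 5) ("", "", 0, "", "")
  let oid : Int := 2 * ((i / 5 : Nat) : Int) + t.2.2.1
  tsBase ++ " " ++ t.1 ++ " order=" ++ p ++ "-" ++ t.2.1 ++ PySem.Int.toStr oid
    ++ " status=" ++ t.2.2.2.1 ++ " message=" ++ t.2.2.2.2

def make_extra_logs_alt (target_lines : Int) (case_prefix : String) : List String :=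
  (List.range (max 0 target_lines).toNat).map (lineB case_prefix)

-- ===== PRECONDITION & SPEC =====
def Spec_make_extra_logs (target_lines : Int) (case_prefix : String) (out : List String) : Prop := out = make_extra_logs_alt target_lines case_prefix
instance (target_lines : Int) (case_prefix : String) (out : List String) : Decidable (Spec_make_extra_logs target_lines case_prefix out) := by unfold Spec_make_extra_logs; infer_instance

-- ===== CLAIM (what is proved, stated in full; the proofs are below) =====
def Claim_equal_make_extra_logs : Prop := ∀ (target_lines : Int) (case_prefix : String), Dom_make_extra_logs target_lines case_prefix → Spec_make_extra_logs target_lines case_prefix (make_extra_logs target_lines case_prefix)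

-- ===== LEMMAS AND PROOFS =====

-- the first m lines of the infinite log stream starting at order id `oid`
def blockFive (p : String) (oid : Int) : List String :=
  [lineN1 p oid, lineN2 p oid, lineN3 p oid, lineX1 p (oid + 1), lineX2 p (oid + 1)]

def streamTake (m : Nat) (p : String) (oid : Int) : List String :=
  if m = 0 then [] else (blockFive p oid).take m ++ streamTake (m - 5) p (oid + 2)
termination_by m
decreasing_by omega

lemma streamTake_zero (p : String) (oid : Int) : streamTake 0 p oid = [] := by
  rw [streamTake]; simp

lemma length_streamTake (m : Nat) (p : String) (oid : Int) :
    (streamTake m p oid).length ≤ m := by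
  induction m using Nat.strong_induction_on generalizing oid with
  | _ m ih =>
    rw [streamTake]
    split_ifs with h
    · simp [h]
    · have := ih (m - 5) (by omega) (oid + 2)
      simp only [List.length_append, List.length_take, blockFive]
      simp only [List.length]
      omega

lemma loopA_eq (t : Int) (p : String) :
    ∀ m (lines : List String) (oid : Int), (t - lines.length).toNat = m →
      loopA t p lines oid = lines ++ streamTake m p oid := by
  intro m
  induction m using Nat.strong_induction_on with
  | _ m ih =>
    intro lines oid hm
    rw [loopA]
    dsimp only
    split_ifs with h1 h2 h3 h4 h5 h6
    · -- break after line 1: m = 1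
      simp only [List.length_append, List.length_cons, List.length_nil] at h2
      have : m = 1 := by omega
      subst this
      rw [streamTake, if_neg (by omega)]
      norm_num [blockFive, streamTake_zero]
    · -- break after line 2: m = 2
      simp only [List.length_append, List.length_cons, List.length_nil] at h2 h3
      have : m = 2 := by omega
      subst this
      rw [streamTake, if_neg (by omega)]
      norm_num [blockFive, streamTake_zero]
    · -- break after line 3: m = 3
      simp only [List.length_append, List.length_cons, List.length_nil] at h2 h3 h4
      have : m = 3 := by omega
      subst this
      rw [streamTake, if_neg (by omega)]
      norm_num [blockFive, streamTake_zero]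
    · -- break after line 4: m = 4
      simp only [List.length_append, List.length_cons, List.length_nil] at h2 h3 h4 h5
      have : m = 4 := by omega
      subst this
      rw [streamTake, if_neg (by omega)]
      norm_num [blockFive, streamTake_zero]
    · -- break after line 5: m = 5
      simp only [List.length_append, List.length_cons, List.length_nil] at h2 h3 h4 h5 h6
      have : m = 5 := by omega
      subst this
      rw [streamTake, if_neg (by omega)]
      norm_num [blockFive, streamTake_zero]
    · -- recurse: m > 5
      simp only [List.length_append, List.length_cons, List.length_nil] at h2 h3 h4 h5 h6
      have hm6 : 5 < m := by omega
      conv_rhs => rw [streamTake]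
      rw [if_neg (by omega)]
      rw [List.take_of_length_le (by simp [blockFive]; omega)]
      rw [ih (m - 5) (by omega) _ (oid + 1 + 1)
        (by simp only [List.length_append, List.length_cons, List.length_nil]; omega)]
      simp only [blockFive, List.append_assoc, List.cons_append, List.nil_append]
      norm_num [add_assoc]
    · -- loop never entered: m = 0
      have : m = 0 := by omega
      subst this
      simp [streamTake]

-- lineB at index 5*k+r is the r-th line of the block with ids 2k+1 / 2k+2
lemma lineB_0 (p : String) (k : Nat) : lineB p (5 * k) = lineN1 p (2 * (k : Int) + 1) := by
  have h1 : (5 * k) % 5 = 0 := by omega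
  have h2 : 5 * k / 5 = k := by omega
  simp [lineB, tmplB, lineN1, h1, h2, String.append_assoc]
lemma lineB_1 (p : String) (k : Nat) : lineB p (5 * k + 1) = lineN2 p (2 * (k : Int) + 1) := by
  have h1 : (5 * k + 1) % 5 = 1 := by omega
  have h2 : (5 * k + 1) / 5 = k := by omega
  simp [lineB, tmplB, lineN2, h1, h2, String.append_assoc]
lemma lineB_2 (p : String) (k : Nat) : lineB p (5 * k + 2) = lineN3 p (2 * (k : Int) + 1) := by
  have h1 : (5 * k + 2) % 5 = 2 := by omega
  have h2 : (5 * k + 2) / 5 = k := by omega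
  simp [lineB, tmplB, lineN3, h1, h2, String.append_assoc]
lemma lineB_3 (p : String) (k : Nat) : lineB p (5 * k + 3) = lineX1 p (2 * (k : Int) + 1 + 1) := by
  have h1 : (5 * k + 3) % 5 = 3 := by omega
  have h2 : (5 * k + 3) / 5 = k := by omega
  have h3 : (2 * (k : Int) + 1 + 1) = 2 * (k : Int) + 2 := by ring
  rw [h3]
  simp [lineB, tmplB, lineX1, h1, h2, String.append_assoc]
lemma lineB_4 (p : String) (k : Nat) : lineB p (5 * k + 4) = lineX2 p (2 * (k : Int) + 1 + 1) := by
  have h1 : (5 * k + 4) % 5 = 4 := by omega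
  have h2 : (5 * k + 4) / 5 = k := by omega
  have h3 : (2 * (k : Int) + 1 + 1) = 2 * (k : Int) + 2 := by ring
  rw [h3]
  simp [lineB, tmplB, lineX2, h1, h2, String.append_assoc]

-- mapping Source B's line over one full block of indices gives blockFive
lemma map_block (p : String) (k : Nat) :
    (List.range' (5 * k) 5).map (lineB p) = blockFive p (2 * (k : Int) + 1) := by
  have e : List.range' (5 * k) 5 = [5 * k, 5 * k + 1, 5 * k + 2, 5 * k + 3, 5 * k + 4] := by
    simp [List.range']
  rw [e]
  simp [blockFive, lineB_0, lineB_1, lineB_2, lineB_3, lineB_4]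

-- mapping Source B's line over the indices [5k, 5k+m) gives the first m stream lines from id 2k+1
lemma map_line_eq (p : String) :
    ∀ m k, (List.range' (5 * k) m).map (lineB p) = streamTake m p (2 * (k : Int) + 1) := by
  intro m
  induction m using Nat.strong_induction_on with
  | _ m ih =>
    intro k
    by_cases h5 : m ≤ 5
    · by_cases hm0 : m = 0
      · subst hm0; simp [streamTake_zero]
      · rw [streamTake, if_neg hm0]
        have h50 : m - 5 = 0 := by omega
        rw [h50, streamTake_zero, List.append_nil]
        rw [Eq.symm (List.take_range'_of_length_ge h5), List.map_take, map_block]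
    · have hsplit : List.range' (5 * k) m = List.range' (5 * k) 5 ++ List.range' (5 * k + 5) (m - 5) := by
        rw [List.range'_append]
        congr 1
        all_goals omega
      rw [hsplit, List.map_append, map_block]
      have h1 : List.range' (5 * k + 5) (m - 5) = List.range' (5 * (k + 1)) (m - 5) := by
        congr 1
      rw [h1, ih (m - 5) (by omega) (k + 1)]
      conv_rhs => rw [streamTake]
      rw [if_neg (by omega)]
      rw [List.take_of_length_le (by simp [blockFive]; omega)]
      have harg : (2 * ((k + 1 : Nat) : Int) + 1) = 2 * (k : Int) + 1 + 2 := by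
        push_cast; ring
      rw [harg]

-- ===== VERDICT (by name: the statement is the Claim_ definition above) =====
theorem make_extra_logs_spec : Claim_equal_make_extra_logs := by
  intro t p _
  unfold Spec_make_extra_logs make_extra_logs make_extra_logs_alt
  rw [loopA_eq t p t.toNat [] 1 (by simp)]
  have hn : (max 0 t).toNat = t.toNat := by omega
  rw [hn, List.range_eq_range']
  have hB : (List.range' (5 * 0) t.toNat).map (lineB p) = streamTake t.toNat p (2 * ((0 : Nat) : Int) + 1) :=
    map_line_eq p t.toNat 0
  norm_num at hB
  simp only [List.nil_append]
  rw [← hB]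
  by_cases ht : 0 ≤ t
  · rw [hB, PySem.List.slice_to _ ht]
    exact List.take_of_length_le (length_streamTake _ _ _)
  · have h0 : t.toNat = 0 := by omega
    rw [h0] at hB ⊢
    rw [hB, streamTake_zero]
    simp [PySem.List.slice]
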